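-- pv_equiv track=rewrite | github.com/seagalputra/n-gram-algorithm | bigram.py | fix_dot_problem
-- ===== SOURCE A (Python) =====
-- def fix_dot_problem(list_of_pTokens):
--     '''
--     Memperbaiki bug dari kesalahan penulisan detik.com
--     berupa dua kalimat yang tergabung dengan "."
--
--     Input : List token berita
--     Output : List token berita yang diperbaiki
--     '''
--
--     list_of_dTokens = []
--     for tokens in list_of_pTokens:
--         for index, token in enumerate(tokens):
--             if "." in token:
--                 dot_index = token.find(".")
--                 before_dot = token[:dot_index]
--                 after_dot = token[dot_index + 1:]
--                 del tokens[index]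
--                 tokens.insert(index, before_dot)
--                 tokens.insert(index + 1, after_dot)
--                 tokens.insert(index + 1, "<\s>")
--                 tokens.insert(index + 2, "<s>")
--         list_of_dTokens.append(tokens)
--     return list_of_dTokens
-- ===== SOURCE B (Python) =====
-- def fix_dot_problem(list_of_pTokens):
--     '''Single linear split-and-build pass per token list (replaces the
--     mutate-while-enumerating insert loop); writes back with tokens[:] = ...
--     to preserve in-place mutation and object identity.'''
--     list_of_dTokens = []
--     for tokens in list_of_pTokens:
--         new_tokens = []
--         for token in tokens:
--             parts = token.split(".")
--             new_tokens.append(parts[0])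
--             for part in parts[1:]:
--                 new_tokens.extend(["<\\s>", "<s>", part])
--         tokens[:] = new_tokens
--         list_of_dTokens.append(tokens)
--     return list_of_dTokens
-- ===== Notes on version B (the rewrite author's own statement) =====
-- stated objective: simpler
-- what changed: Replaces A's mutate-while-enumerating del/insert loop (which re-scans the freshly inserted tail to reach further dots) by one linear pass that splits each token on '.' once and builds the new list with the markers interleaved.
import Mathlib
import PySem

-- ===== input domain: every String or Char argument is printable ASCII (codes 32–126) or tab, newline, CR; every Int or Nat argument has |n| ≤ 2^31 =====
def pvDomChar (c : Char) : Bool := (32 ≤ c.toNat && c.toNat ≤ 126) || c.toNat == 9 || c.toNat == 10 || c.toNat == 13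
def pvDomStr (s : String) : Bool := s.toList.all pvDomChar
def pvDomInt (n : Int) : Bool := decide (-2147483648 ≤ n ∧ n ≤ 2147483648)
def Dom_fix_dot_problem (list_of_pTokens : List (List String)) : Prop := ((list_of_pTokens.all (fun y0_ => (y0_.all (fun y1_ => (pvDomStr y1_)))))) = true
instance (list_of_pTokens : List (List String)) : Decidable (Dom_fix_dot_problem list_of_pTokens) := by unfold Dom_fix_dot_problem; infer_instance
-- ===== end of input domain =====

-- B replaces A's mutate-while-enumerating del/insert loop by one linear pass that splits each
-- token on '.' once and interleaves the sentence markers (objective: simpler).  A mutates each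
-- inner list in place and returns the same list objects; B preserves that via tokens[:] = ...;
-- the theorems here are about the return value.

-- ===== PORT A =====
-- dot count of the whole token list: only used by the termination measure of the loop below
def pvDots (tokens : List String) : Nat := (tokens.map (fun t => t.toList.count '.')).sum

-- literal transliteration of A's inner enumerate loop: index i over the list being
-- mutated (Python's list iterator re-reads length and element at each step); the fuel
-- argument only makes the recursion structural and is proven sufficient below
def pvFixLoop (fuel : Nat) (tokens : List String) (i : Nat) : List String :=
  match fuel with
  | 0 => tokens
  | fuel + 1 =>
    if h : i < tokens.length then
      let token := tokens[i]
      if hd : PySem.Str.isIn "." token then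
        let dot_index := PySem.Str.find token "."
        let before_dot := PySem.Str.slice token none (some dot_index)
        let after_dot := PySem.Str.slice token (some (dot_index + 1)) none
        let t1 := tokens.eraseIdx i                                   -- del tokens[index]
        let t2 := PySem.List.insert t1 (i : Int) before_dot           -- tokens.insert(index, before_dot)
        let t3 := PySem.List.insert t2 ((i : Int) + 1) after_dot      -- tokens.insert(index+1, after_dot)
        let t4 := PySem.List.insert t3 ((i : Int) + 1) "<\\s>"        -- tokens.insert(index+1, "<\\s>")
        let t5 := PySem.List.insert t4 ((i : Int) + 2) "<s>"          -- tokens.insert(index+2, "<s>")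
        pvFixLoop fuel t5 (i + 1)
      else
        pvFixLoop fuel tokens (i + 1)
    else tokens

def fix_dot_problem (list_of_pTokens : List (List String)) : List (List String) :=
  list_of_pTokens.map (fun tokens => pvFixLoop (3 * pvDots tokens + tokens.length) tokens 0)

-- ===== PORT B =====
-- parts = token.split("."); emit parts[0], then "<\\s>", "<s>", part for each later part
def pvExpand (token : String) : List String :=
  match (PySem.Str.split? token ".").getD [] with
  | [] => []
  | p :: ps => p :: ps.flatMap (fun part => ["<\\s>", "<s>", part])

def fix_dot_problem_alt (list_of_pTokens : List (List String)) : List (List String) :=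
  list_of_pTokens.map (fun tokens => tokens.flatMap pvExpand)

-- ===== PRECONDITION & SPEC =====
def Spec_fix_dot_problem (list_of_pTokens : List (List String)) (out : List (List String)) : Prop := out = fix_dot_problem_alt list_of_pTokens
instance (list_of_pTokens : List (List String)) (out : List (List String)) : Decidable (Spec_fix_dot_problem list_of_pTokens out) := by unfold Spec_fix_dot_problem; infer_instance

-- ===== CLAIM (what is proved, stated in full; the proofs are below) =====
def Claim_equal_fix_dot_problem : Prop := ∀ (list_of_pTokens : List (List String)), Dom_fix_dot_problem list_of_pTokens → Spec_fix_dot_problem list_of_pTokens (fix_dot_problem list_of_pTokens)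

-- ===== LEMMAS AND PROOFS =====

theorem pvDots_cons (t : String) (l : List String) :
    pvDots (t :: l) = t.toList.count '.' + pvDots l := by
  simp [pvDots]

-- decomposition of a string at its first '.' (A's find + slices)
theorem pvSplitAt (t : List Char) (h : '.' ∈ t) :
    PySem.Chars.find t ['.'] = ((PySem.Chars.find t ['.']).toNat : Int) ∧
    (PySem.Chars.find t ['.']).toNat < t.length ∧
    '.' ∉ t.take (PySem.Chars.find t ['.']).toNat ∧
    t = t.take (PySem.Chars.find t ['.']).toNat ++ '.' :: t.drop ((PySem.Chars.find t ['.']).toNat + 1) := by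
  have hinf : ['.'] <:+: t := by
    obtain ⟨l₁, l₂, rfl⟩ := List.append_of_mem h
    exact ⟨l₁, l₂, by simp⟩
  have hnn : 0 ≤ PySem.Chars.find t ['.'] := (PySem.Chars.find_nonneg_iff t ['.']).2 hinf
  obtain ⟨hpre, hmin⟩ := PySem.Chars.find_spec hnn
  set k := (PySem.Chars.find t ['.']).toNat with hk
  have hcast : PySem.Chars.find t ['.'] = (k : Int) := (Int.toNat_of_nonneg hnn).symm
  have hklen : k < t.length := by
    rcases hpre with ⟨r, hr⟩
    by_contra hge
    simp [List.drop_eq_nil_of_le (le_of_not_gt hge)] at hr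
  refine ⟨hcast, hklen, ?_, ?_⟩
  · intro hmem
    obtain ⟨j, hj, hjget⟩ := List.mem_iff_getElem.1 hmem
    have hjk : j < k := lt_of_lt_of_le hj (by simp)
    refine hmin j hjk ⟨t.drop (j+1), ?_⟩
    have : t[j]'(lt_of_lt_of_le hjk hklen.le) = '.' := by
      simp [List.getElem_take] at hjget; exact hjget
    rw [List.drop_eq_getElem_cons (lt_of_lt_of_le hjk hklen.le), this]
    rfl
  · rcases hpre with ⟨r, hr⟩
    conv_lhs => rw [← List.take_append_drop k t]
    rw [List.drop_eq_getElem_cons hklen]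
    have ht : t[k] = '.' := by
      have hd : ('.' :: r : List Char) = t[k] :: t.drop (k+1) := by
        rw [← List.drop_eq_getElem_cons hklen]; exact hr
      exact (List.cons_eq_cons.mp hd).1.symm
    simp [ht]

-- insertion into a list right after a prefix of known length (shape of A's del/insert sequence)
theorem pvInsertAt (pre l : List String) (v : String) :
    PySem.List.insert (pre ++ l) ((pre.length : Nat) : Int) v = pre ++ v :: l := by
  rw [PySem.List.insert_natCast (pre ++ l) pre.length v (by simp)]
  simp

-- the net effect of A's del + four inserts at index i
theorem pvMutShape (done rest : List String) (t b m s a : String) (i : Nat) (hlen : done.length = i) :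
    PySem.List.insert
      (PySem.List.insert
        (PySem.List.insert
          (PySem.List.insert ((done ++ t :: rest).eraseIdx i) ((i : Nat) : Int) b)
          (((i : Nat) : Int) + 1) a)
        (((i : Nat) : Int) + 1) m)
      (((i : Nat) : Int) + 2) s
    = done ++ b :: m :: s :: a :: rest := by
  subst hlen
  have h1 : (done ++ t :: rest).eraseIdx done.length = done ++ rest := by
    rw [List.eraseIdx_append_of_length_le (le_refl _)]
    simp
  rw [h1, pvInsertAt done rest b]
  have e1 : ((done.length : Nat) : Int) + 1 = (((done ++ [b]).length : Nat) : Int) := by simp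
  have e2 : ((done.length : Nat) : Int) + 2 = (((done ++ [b, m]).length : Nat) : Int) := by simp
  have r1 : done ++ b :: rest = (done ++ [b]) ++ rest := by simp
  rw [r1, e1, pvInsertAt (done ++ [b]) rest a]
  have r2 : (done ++ [b]) ++ a :: rest = (done ++ [b]) ++ a :: rest := rfl
  rw [pvInsertAt (done ++ [b]) (a :: rest) m]
  have r3 : (done ++ [b]) ++ m :: a :: rest = (done ++ [b, m]) ++ a :: rest := by simp
  rw [r3, e2, pvInsertAt (done ++ [b, m]) (a :: rest) s]
  simp

-- Str.isIn "." is membership of '.' (bridge used by the loop proofs)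
theorem pvDotMem (t : String) : PySem.Str.isIn "." t = true ↔ '.' ∈ t.toList := by
  rw [PySem.Str.isIn_iff_infix]
  constructor
  · rintro ⟨p, q, hpq⟩
    have hts : (".").toList = ['.'] := by decide
    rw [hts] at hpq
    rw [← hpq]; simp
  · intro h
    obtain ⟨l₁, l₂, hh⟩ := List.append_of_mem h
    rw [hh]
    exact ⟨l₁, l₂, by simp⟩

-- the first-dot split of a token, stated on A's slice expressions (cited by the
-- termination proof of the loop and by the equivalence proofs)
theorem pvStep (token : String) (hd : PySem.Str.isIn "." token = true) :
    '.' ∉ (PySem.Str.slice token none (some (PySem.Str.find token "."))).toList ∧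
    token.toList = (PySem.Str.slice token none (some (PySem.Str.find token "."))).toList ++
      '.' :: (PySem.Str.slice token (some (PySem.Str.find token "." + 1)) none).toList ∧
    token.toList.count '.' =
      (PySem.Str.slice token (some (PySem.Str.find token "." + 1)) none).toList.count '.' + 1 := by
  have hmem : '.' ∈ token.toList := (pvDotMem token).1 hd
  obtain ⟨hcast, hklen, hnotin, hdecomp⟩ := pvSplitAt token.toList hmem
  have hfind : PySem.Str.find token "." = PySem.Chars.find token.toList ['.'] := by
    have hts : (".").toList = ['.'] := by decide
    simp [← hts]
  set k := (PySem.Chars.find token.toList ['.']).toNat with hk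
  have hb : (PySem.Str.slice token none (some (PySem.Str.find token "."))).toList = token.toList.take k := by
    rw [hfind, hcast]
    simp [pysem]
  have ha : (PySem.Str.slice token (some (PySem.Str.find token "." + 1)) none).toList = token.toList.drop (k + 1) := by
    rw [hfind, hcast]
    have h1 : (k : Int) + 1 = ((k + 1 : Nat) : Int) := by omega
    rw [h1]
    simp only [pysem]
  refine ⟨hb ▸ hnotin, by rw [hb, ha]; exact hdecomp, ?_⟩
  rw [ha]
  conv_lhs => rw [hdecomp]
  rw [List.count_append]
  have : (token.toList.take k).count '.' = 0 := List.count_eq_zero.2 hnotin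
  rw [this]
  simp

-- reference splitter: split a char list on '.'
def pvSplitD : List Char → List (List Char)
  | [] => [[]]
  | c :: r => if c = '.' then [] :: pvSplitD r else
      match pvSplitD r with
      | [] => [[c]]
      | p :: ps => (c :: p) :: ps

theorem pvSplitD_ne_nil (l : List Char) : pvSplitD l ≠ [] := by
  cases l with
  | nil => simp [pvSplitD]
  | cons c r =>
    simp only [pvSplitD]
    split_ifs
    · simp
    · cases pvSplitD r <;> simp

-- prepend onto the head piece
def pvPrepend (p : List Char) : List (List Char) → List (List Char)
  | [] => [p]
  | q :: qs => (p ++ q) :: qs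

theorem pvPrepend_append (a b : List Char) (x : List (List Char)) :
    pvPrepend (a ++ b) x = pvPrepend a (pvPrepend b x) := by
  cases x <;> simp [pvPrepend]

theorem pvPrepend_nil (x : List (List Char)) (hx : x ≠ []) : pvPrepend [] x = x := by
  cases x with
  | nil => exact absurd rfl hx
  | cons q qs => simp [pvPrepend]

-- the fuelled splitter of the prelude computes pvSplitD
theorem pvGo_eq (l : List Char) : ∀ (fuel : Nat) (cur : List Char) (acc : List (List Char)),
    l.length < fuel →
    PySem.Chars.splitOn.go ['.'] fuel l cur acc = acc.reverse ++ pvPrepend cur.reverse (pvSplitD l) := by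
  induction l with
  | nil =>
    intro fuel cur acc hf
    cases fuel with
    | zero => omega
    | succ f =>
      rw [PySem.Chars.splitOn.go]
      · simp [pvSplitD, pvPrepend]
      · omega
  | cons c r ih =>
    intro fuel cur acc hf
    cases fuel with
    | zero => omega
    | succ f =>
      rw [PySem.Chars.splitOn.go]
      by_cases hc : c = '.'
      · have hp : List.isPrefixOf ['.'] (c :: r) = true := by
          simp [List.isPrefixOf, hc]
        rw [if_pos hp]
        have hdrop : List.drop (['.'] : List Char).length (c :: r) = r := by simp
        rw [hdrop, ih f [] (cur.reverse :: acc) (by simpa using hf)]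
        have : pvSplitD (c :: r) = [] :: pvSplitD r := by
          rw [pvSplitD, if_pos hc]
        rw [this]
        cases hs : pvSplitD r with
        | nil => exact absurd hs (pvSplitD_ne_nil r)
        | cons q qs => simp [pvPrepend]
      · have hp : List.isPrefixOf ['.'] (c :: r) = false := by
          simp only [List.isPrefixOf, Bool.and_eq_false_iff, beq_eq_false_iff_ne, ne_eq]
          left; exact fun hh => hc hh.symm
        rw [if_neg (by simp [hp]), ih f (c :: cur) acc (by simpa using hf)]
        have : pvSplitD (c :: r) = pvPrepend [c] (pvSplitD r) := by
          rw [pvSplitD, if_neg hc]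
          cases pvSplitD r <;> simp [pvPrepend]
        rw [this, ← pvPrepend_append]
        simp

theorem pvSplitOn_eq (l : List Char) : PySem.Chars.splitOn l ['.'] = pvSplitD l := by
  rw [PySem.Chars.splitOn, pvGo_eq l (l.length + 1) [] [] (by omega)]
  simp [pvPrepend_nil _ (pvSplitD_ne_nil l)]

theorem pvSplitD_no_dot (l : List Char) (h : '.' ∉ l) : pvSplitD l = [l] := by
  induction l with
  | nil => rfl
  | cons c r ih =>
    simp only [List.mem_cons, not_or] at h
    rw [pvSplitD, if_neg (fun hh => h.1 hh.symm), ih h.2]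

theorem pvSplitD_dot (pre suf : List Char) (h : '.' ∉ pre) :
    pvSplitD (pre ++ '.' :: suf) = pre :: pvSplitD suf := by
  induction pre with
  | nil => simp [pvSplitD]
  | cons c p ih =>
    simp only [List.mem_cons, not_or] at h
    rw [List.cons_append, pvSplitD, if_neg (fun hh => h.1 hh.symm), ih h.2]

-- pvExpand in terms of pvSplitD
theorem pvExpand_eq (t : String) :
    pvExpand t = match (pvSplitD t.toList).map String.ofList with
      | [] => []
      | p :: ps => p :: ps.flatMap (fun part => ["<\\s>", "<s>", part]) := by
  have : PySem.Str.split? t "." = some (((pvSplitD t.toList)).map String.ofList) := by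
    rw [PySem.Str.split?]
    have hts : (".").toList = ['.'] := by decide
    rw [hts, PySem.Chars.split?]
    simp [pvSplitOn_eq]
  rw [pvExpand, this]
  rfl

theorem pvExpand_no_dot (t : String) (h : '.' ∉ t.toList) : pvExpand t = [t] := by
  rw [pvExpand_eq, pvSplitD_no_dot _ h]
  simp

theorem pvExpand_dot (t b a : String) (h : '.' ∉ b.toList)
    (ht : t.toList = b.toList ++ '.' :: a.toList) :
    pvExpand t = b :: "<\\s>" :: "<s>" :: pvExpand a := by
  rw [pvExpand_eq, ht, pvSplitD_dot _ _ h]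
  rw [pvExpand_eq]
  cases hs : pvSplitD a.toList with
  | nil => exact absurd hs (pvSplitD_ne_nil _)
  | cons q qs => simp

-- the main loop invariant: processed prefix is dot-free, and the loop expands the rest
theorem pvFixLoop_eq (n : Nat) : ∀ (done rest : List String),
    3 * pvDots rest + rest.length ≤ n →
    (∀ t ∈ done, '.' ∉ t.toList) →
    pvFixLoop n (done ++ rest) done.length = done ++ rest.flatMap pvExpand := by
  induction n with
  | zero =>
    intro done rest hn hdone
    have hr : rest = [] := by
      cases rest with
      | nil => rfl
      | cons a b => simp at hn
    subst hr
    rw [pvFixLoop]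
    simp
  | succ n ih =>
    intro done rest hn hdone
    cases rest with
    | nil =>
      rw [pvFixLoop]
      simp
    | cons t r =>
      have hlt : done.length < (done ++ t :: r).length := by simp
      have hget : (done ++ t :: r)[done.length]'hlt = t := by
        simp
      rw [pvFixLoop, dif_pos hlt]
      simp only [hget]
      by_cases hd : PySem.Str.isIn "." t = true
      · rw [dif_pos hd]
        obtain ⟨hnb, hdec, hcnt⟩ := pvStep t hd
        rw [pvMutShape done r t _ _ _ _ done.length rfl]
        have hstep : done ++
            (PySem.Str.slice t none (some (PySem.Str.find t "."))) ::
            ("<\\s>" : String) :: ("<s>" : String) ::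
            (PySem.Str.slice t (some (PySem.Str.find t "." + 1)) none) :: r
            = (done ++ [PySem.Str.slice t none (some (PySem.Str.find t "."))]) ++
              (("<\\s>" : String) :: ("<s>" : String) ::
               (PySem.Str.slice t (some (PySem.Str.find t "." + 1)) none) :: r) := by
          simp
        have hlen1 : done.length + 1 = (done ++ [PySem.Str.slice t none (some (PySem.Str.find t "."))]).length := by
          simp
        rw [hstep, hlen1]
        have hms : ("<\\s>" : String).toList.count '.' = 0 := by decide
        have hss : ("<s>" : String).toList.count '.' = 0 := by decide
        have hmeas : 3 * pvDots (("<\\s>" : String) :: ("<s>" : String) ::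
            (PySem.Str.slice t (some (PySem.Str.find t "." + 1)) none) :: r) +
            (("<\\s>" : String) :: ("<s>" : String) ::
            (PySem.Str.slice t (some (PySem.Str.find t "." + 1)) none) :: r).length ≤ n := by
          simp only [pvDots_cons, hms, hss, List.length_cons]
          rw [pvDots_cons] at hn
          simp only [List.length_cons] at hn
          omega
        have hdone' : ∀ u ∈ done ++ [PySem.Str.slice t none (some (PySem.Str.find t "."))], '.' ∉ u.toList := by
          intro u hu
          rcases List.mem_append.1 hu with h1 | h1
          · exact hdone u h1
          · simp at h1
            subst h1
            exact hnb
        rw [ih _ _ hmeas hdone']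
        conv_rhs => rw [List.flatMap_cons, pvExpand_dot t _ _ hnb hdec]
        simp [pvExpand_no_dot ("<\\s>" : String) (by decide), pvExpand_no_dot ("<s>" : String) (by decide)]
      · rw [dif_neg hd]
        have hnd : '.' ∉ t.toList := fun hm => hd ((pvDotMem t).2 hm)
        have hstep : done ++ t :: r = (done ++ [t]) ++ r := by simp
        have hlen1 : done.length + 1 = (done ++ [t]).length := by simp
        rw [hstep, hlen1]
        have hmeas : 3 * pvDots r + r.length ≤ n := by
          rw [pvDots_cons] at hn
          simp only [List.length_cons] at hn
          omega
        have hdone' : ∀ u ∈ done ++ [t], '.' ∉ u.toList := by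
          intro u hu
          rcases List.mem_append.1 hu with h1 | h1
          · exact hdone u h1
          · simp at h1
            subst h1
            exact hnd
        rw [ih _ _ hmeas hdone']
        simp [pvExpand_no_dot t hnd]

-- ===== VERDICT (by name: the statement is the Claim_ definition above) =====
theorem fix_dot_problem_spec : Claim_equal_fix_dot_problem := by
  intro l _
  unfold Spec_fix_dot_problem fix_dot_problem fix_dot_problem_alt
  refine List.map_congr_left (fun tokens _ => ?_)
  have := pvFixLoop_eq (3 * pvDots tokens + tokens.length) [] tokens (le_refl _) (by simp)
  simpa using this
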